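-- pv_equiv track=rewrite | github.com/bcveber/COSC101 | lab12/Study_Guide.py | streaks_2
-- ===== SOURCE A (Python) =====
-- def streaks_2(num_list):
--     count = 0
--     streak_count = 0
--
--     for num in num_list:
--         if num == 0:
--             count = 0
--         if num != 0:
--             count += 1
--         if count == 3:
--             streak_count += 1
--
--     return streak_count
-- ===== SOURCE B (Python) =====
-- def streaks_2(num_list):
--     # Run-skipping scan: jump over each maximal nonzero run at once,
--     # counting runs of length >= 3 (instead of A's per-element state machine).
--     total = 0
--     i = 0
--     n = len(num_list)
--     while i < n:
--         if num_list[i] == 0: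
--             i += 1
--         else:
--             j = i
--             while j < n and num_list[j] != 0:
--                 j += 1
--             if j - i >= 3:
--                 total += 1
--             i = j
--     return total
-- ===== Notes on version B (the rewrite author's own statement) =====
-- stated objective: alternative
-- what changed: A simulates a per-element counter/reset state machine; B scans by maximal nonzero runs (inner skip loop), counting each run of length >= 3 directly.
import Mathlib
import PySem

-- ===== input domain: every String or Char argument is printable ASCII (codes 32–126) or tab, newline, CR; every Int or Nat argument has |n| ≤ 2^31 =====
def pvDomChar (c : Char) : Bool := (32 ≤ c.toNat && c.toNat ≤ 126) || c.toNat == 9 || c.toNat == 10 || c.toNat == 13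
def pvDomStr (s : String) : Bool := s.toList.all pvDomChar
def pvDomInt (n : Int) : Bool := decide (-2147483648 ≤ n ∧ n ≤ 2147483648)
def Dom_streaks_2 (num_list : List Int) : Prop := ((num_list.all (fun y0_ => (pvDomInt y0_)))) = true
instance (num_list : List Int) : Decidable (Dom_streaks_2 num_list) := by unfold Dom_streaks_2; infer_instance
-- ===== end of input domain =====

-- B scans by maximal nonzero runs instead of A's per-element counter/reset state machine; alternative decomposition, same cost.

-- ===== PORT A =====
-- A's loop body: reset count on zero, increment on nonzero, bump streak_count when count hits 3.
def stepA (st : Int × Int) (num : Int) : Int × Int :=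
  let c1 := if num = 0 then 0 else st.1
  let c2 := if num ≠ 0 then c1 + 1 else c1
  let sc := if c2 = 3 then st.2 + 1 else st.2
  (c2, sc)

def streaks_2 (num_list : List Int) : Int :=
  (num_list.foldl stepA (0, 0)).2

-- ===== PORT B =====
-- Source B's outer while loop as structural recursion: skip a zero, or consume a whole
-- maximal nonzero run (the inner 'while j' loop = takeWhile/dropWhile) at once.
def altGo : List Int → Int
  | [] => 0
  | x :: xs =>
    if x = 0 then altGo xs
    else
      (if 3 ≤ (xs.takeWhile (fun y => y != 0)).length + 1 then (1 : Int) else 0)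
        + altGo (xs.dropWhile (fun y => y != 0))
termination_by l => l.length
decreasing_by
  · simp
  · have := List.length_dropWhile_le (p := fun y => y != 0) (l := xs)
    simpa using Nat.lt_succ_of_le this

def streaks_2_alt (num_list : List Int) : Int := altGo num_list

-- ===== PRECONDITION & SPEC =====
def Spec_streaks_2 (num_list : List Int) (out : Int) : Prop := out = streaks_2_alt num_list
instance (num_list : List Int) (out : Int) : Decidable (Spec_streaks_2 num_list out) := by unfold Spec_streaks_2; infer_instance

-- ===== CLAIM (what is proved, stated in full; the proofs are below) =====
def Claim_equal_streaks_2 : Prop := ∀ (num_list : List Int), Dom_streaks_2 num_list → Spec_streaks_2 num_list (streaks_2 num_list)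

-- ===== LEMMAS AND PROOFS =====

-- A's fold across a run of nonzero elements: count advances by the run length,
-- streak_count bumps exactly once iff the count crosses 3 inside the run.
theorem foldA_run (r : List Int) (h : ∀ y ∈ r, y ≠ 0) (c s : Int) (hc : 0 ≤ c) :
    List.foldl stepA (c, s) r
      = (c + r.length, if c < 3 ∧ 3 ≤ c + r.length then s + 1 else s) := by
  induction r generalizing c s with
  | nil =>
    simp only [List.foldl_nil, List.length_nil, Nat.cast_zero, add_zero]
    rw [if_neg (by omega)]
  | cons y r ih =>
    have hy : y ≠ 0 := h y (by simp)
    have step : stepA (c, s) y = (c + 1, if c + 1 = 3 then s + 1 else s) := by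
      simp [stepA, hy]
    rw [List.foldl_cons, step, ih (fun z hz => h z (by simp [hz])) _ _ (by omega)]
    refine Prod.ext ?_ ?_ <;> simp only [List.length_cons] <;> push_cast <;>
      (try split_ifs) <;> omega

-- after a zero the pending count is irrelevant (it is reset)
theorem foldA_zero_head (t : List Int) (c s : Int) :
    List.foldl stepA (c, s) (0 :: t) = List.foldl stepA (0, s) t := by
  simp [stepA]

theorem altGo_eq (l : List Int) : ∀ s : Int, (List.foldl stepA (0, s) l).2 = s + altGo l := by
  induction l using altGo.induct with
  | case1 => intro s; simp [altGo]
  | case2 xs ih =>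
    intro s
    rw [foldA_zero_head, ih s, altGo]
    simp
  | case3 x xs hx ih =>
    intro s
    have hsplit : xs = xs.takeWhile (fun y => y != 0) ++ xs.dropWhile (fun y => y != 0) :=
      (List.takeWhile_append_dropWhile).symm
    set run := xs.takeWhile (fun y => y != 0) with hrun
    set rest := xs.dropWhile (fun y => y != 0) with hrest
    have hstep : stepA (0, s) x = (1, s) := by simp [stepA, hx]
    have hmem : ∀ y ∈ run, y ≠ 0 := by
      intro y hy
      have := List.mem_takeWhile_imp (hrun ▸ hy)
      simpa using this
    have hfold : List.foldl stepA (0, s) (x :: xs)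
        = List.foldl stepA (1 + run.length,
            if (1 : Int) < 3 ∧ 3 ≤ 1 + (run.length : Int) then s + 1 else s) rest := by
      conv_lhs => rw [List.foldl_cons, hstep, hsplit, List.foldl_append]
      rw [foldA_run run hmem 1 s (by omega)]
    have haltgo : altGo (x :: xs) = (if 3 ≤ run.length + 1 then (1 : Int) else 0) + altGo rest := by
      rw [altGo, if_neg hx]
    have hdrop : ∀ s'' : Int, (List.foldl stepA (1 + (run.length : Int), s'') rest).2
        = s'' + altGo rest := by
      intro s''
      match hr : rest with
      | [] => simp [altGo]
      | y :: t =>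
        have hh : (List.dropWhile (fun y => y != 0) xs).head? = some y := by
          rw [← hrest]; rfl
        have hy0 : y = 0 := by
          have := List.head?_dropWhile_not (p := fun y => y != 0) (l := xs)
          rw [hh] at this
          simpa using this
        subst hy0
        rw [foldA_zero_head, ← foldA_zero_head t 0 s'', ih s'']
    rw [hfold, hdrop, haltgo]
    by_cases h1 : 3 ≤ run.length + 1
    · rw [if_pos h1, if_pos ⟨by omega, by omega⟩]; ring
    · rw [if_neg h1, if_neg (by rintro ⟨-, h2⟩; omega)]; ring

theorem streaks_2_spec : Claim_equal_streaks_2 := by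
  intro l _
  unfold Spec_streaks_2 streaks_2 streaks_2_alt
  simpa using altGo_eq l 0
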